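-- pv_equiv track=rewrite | github.com/vshie/KaumauiCam | app/scheduler.py | _normalize_slots
-- ===== SOURCE A (Python) =====
-- from typing import Dict, List, Set, Tuple
--
-- def _normalize_slots(slots: object) -> List[int]:
--     if not isinstance(slots, list):
--         return []
--     out: Set[int] = set()
--     for s in slots:
--         try:
--             i = int(s)
--         except (TypeError, ValueError):
--             continue
--         if 0 <= i < 96:
--             out.add(i)
--     return sorted(out)
-- ===== SOURCE B (Python) =====
-- from typing import List
--
-- def _normalize_slots(slots: object) -> List[int]:
--     if not isinstance(slots, list):
--         return []
--     vals: List[int] = []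
--     for s in slots:
--         try:
--             vals.append(int(s))
--         except (TypeError, ValueError):
--             pass
--     vals.sort()
--     out: List[int] = []
--     for v in vals:
--         if 0 <= v < 96:
--             if not out or out[-1] != v:
--                 out.append(v)
--     return out
-- ===== Notes on version B (the rewrite author's own statement) =====
-- stated objective: alternative
-- what changed: Instead of accumulating a set and sorting it at the end, B first sorts the raw parsed values, then does a single linear scan that filters to [0,96) and drops adjacent duplicates (correct because equal values are adjacent in a sorted list).
import Mathlib
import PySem

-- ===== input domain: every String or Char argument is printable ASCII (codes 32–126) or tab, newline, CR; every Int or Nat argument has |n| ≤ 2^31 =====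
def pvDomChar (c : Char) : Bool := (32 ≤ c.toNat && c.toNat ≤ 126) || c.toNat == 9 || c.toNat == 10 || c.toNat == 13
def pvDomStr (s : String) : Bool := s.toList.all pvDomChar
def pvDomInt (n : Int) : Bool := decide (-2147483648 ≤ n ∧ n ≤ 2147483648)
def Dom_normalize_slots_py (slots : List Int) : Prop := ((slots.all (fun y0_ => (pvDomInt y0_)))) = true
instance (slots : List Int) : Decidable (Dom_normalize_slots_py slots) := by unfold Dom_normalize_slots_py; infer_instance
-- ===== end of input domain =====

-- B sorts the parsed values first and then removes out-of-range values and adjacent duplicates in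
-- one linear scan, instead of A's accumulate-into-a-set-then-sort (objective: alternative algorithm).

-- ===== PORT A =====
-- for s in slots: out.add(i) if 0 <= int(s) < 96 (int(s) = s on Int inputs; try/except never fires); then sorted(out)
def normalize_slots_py (slots : List Int) : List Int :=
  PySem.List.sorted
    (slots.foldl (fun acc s => if 0 ≤ s ∧ s < 96 then PySem.Set.add acc s else acc) PySem.Set.empty)
    (fun x => x) false

-- ===== PORT B =====
-- vals = [int(s) for s ...] (int(s) = s on Int inputs); vals.sort();
-- then one scan: keep v if 0 <= v < 96 and (not out or out[-1] != v)
def normalize_slots_py_alt (slots : List Int) : List Int :=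
  let vals := PySem.List.sorted (slots.foldl (fun vals s => vals ++ [s]) []) (fun x => x) false
  vals.foldl
    (fun out v =>
      if 0 ≤ v ∧ v < 96 then
        if out.getLast? = some v then out else out ++ [v]
      else out) []

-- ===== PRECONDITION & SPEC =====
def Spec_normalize_slots_py (slots : List Int) (out : List Int) : Prop := out = normalize_slots_py_alt slots
instance (slots : List Int) (out : List Int) : Decidable (Spec_normalize_slots_py slots out) := by unfold Spec_normalize_slots_py; infer_instance

-- ===== CLAIM (what is proved, stated in full; the proofs are below) =====
def Claim_equal_normalize_slots_py : Prop := ∀ (slots : List Int), Dom_normalize_slots_py slots → Spec_normalize_slots_py slots (normalize_slots_py slots)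

-- ===== LEMMAS AND PROOFS =====

-- membership in A's accumulated set
theorem mem_foldl_set (slots : List Int) (acc : PySem.Set Int) (x : Int) :
    x ∈ slots.foldl (fun acc s => if 0 ≤ s ∧ s < 96 then PySem.Set.add acc s else acc) acc ↔
      x ∈ acc ∨ (x ∈ slots ∧ 0 ≤ x ∧ x < 96) := by
  induction slots generalizing acc with
  | nil => simp
  | cons s t ih =>
    simp only [List.foldl_cons, ih]
    split_ifs with h
    · simp only [PySem.Set.mem_add, List.mem_cons]
      constructor
      · rintro (⟨hx | rfl⟩ | ⟨ht, hb⟩)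
        · exact Or.inl hx
        · exact Or.inr ⟨Or.inl rfl, h⟩
        · exact Or.inr ⟨Or.inr ht, hb⟩
      · rintro (hx | ⟨rfl | ht, hb⟩)
        · exact Or.inl (Or.inl hx)
        · exact Or.inl (Or.inr rfl)
        · exact Or.inr ⟨ht, hb⟩
    · simp only [List.mem_cons]
      constructor
      · rintro (hx | ⟨ht, hb⟩)
        · exact Or.inl hx
        · exact Or.inr ⟨Or.inr ht, hb⟩
      · rintro (hx | ⟨rfl | ht, hb⟩)
        · exact Or.inl hx
        · exact absurd hb h
        · exact Or.inr ⟨ht, hb⟩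

theorem nodup_foldl_set (slots : List Int) (acc : PySem.Set Int) (h : acc.Nodup) :
    (slots.foldl (fun acc s => if 0 ≤ s ∧ s < 96 then PySem.Set.add acc s else acc) acc).Nodup := by
  induction slots generalizing acc with
  | nil => simpa
  | cons s t ih =>
    simp only [List.foldl_cons]
    apply ih
    split_ifs
    · exact PySem.Set.nodup_add _ _ h
    · exact h

-- the append loop building vals is the identity
theorem foldl_append_id (slots acc : List Int) :
    slots.foldl (fun vals s => vals ++ [s]) acc = acc ++ slots := by
  induction slots generalizing acc with
  | nil => simp
  | cons s t ih => simp [ih, List.append_assoc]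

-- in a strictly increasing list the last element bounds every member
theorem le_getLast_of_pairwise_lt : ∀ (out : List Int), out.Pairwise (· < ·) →
    ∀ a ∈ out, ∃ m, out.getLast? = some m ∧ a ≤ m := by
  intro out
  induction out with
  | nil => intro _ a ha; cases ha
  | cons y ys ih =>
    intro h a ha
    cases ys with
    | nil =>
      simp only [List.mem_cons, List.not_mem_nil, or_false] at ha
      exact ⟨y, rfl, le_of_eq ha⟩
    | cons z zs =>
      have h' := (List.pairwise_cons.mp h).2
      rcases List.mem_cons.mp ha with rfl | ha'
      · obtain ⟨m, hm, _⟩ := ih h' z List.mem_cons_self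
        exact ⟨m, by rw [List.getLast?_cons_cons]; exact hm,
          le_of_lt ((List.pairwise_cons.mp h).1 m (List.mem_of_getLast? hm))⟩
      · obtain ⟨m, hm, hle⟩ := ih h' a ha'
        exact ⟨m, by rw [List.getLast?_cons_cons]; exact hm, hle⟩

-- B's scan over a ≤-sorted list is strictly increasing and collects exactly the in-range members
theorem scan_invariant (L : List Int) (out : List Int)
    (hL : L.Pairwise (· ≤ ·)) (hout : out.Pairwise (· < ·))
    (hle : ∀ a ∈ out, ∀ b ∈ L, a ≤ b) :
    (L.foldl (fun out v => if 0 ≤ v ∧ v < 96 then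
        if out.getLast? = some v then out else out ++ [v] else out) out).Pairwise (· < ·) ∧
    (∀ x, x ∈ (L.foldl (fun out v => if 0 ≤ v ∧ v < 96 then
        if out.getLast? = some v then out else out ++ [v] else out) out) ↔
      x ∈ out ∨ (x ∈ L ∧ 0 ≤ x ∧ x < 96)) := by
  induction L generalizing out with
  | nil => simp [hout]
  | cons v t ih =>
    have hvt : ∀ b ∈ t, v ≤ b := (List.pairwise_cons.mp hL).1
    have ht : t.Pairwise (· ≤ ·) := (List.pairwise_cons.mp hL).2
    simp only [List.foldl_cons]
    split_ifs with hr hlast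
    · -- in range, last = v: skip; v ∈ out
      have hv_mem : v ∈ out := by
        cases hout' : out.getLast? with
        | none => simp [hout'] at hlast
        | some m =>
          rw [hout'] at hlast
          cases hlast
          exact List.mem_of_getLast? hout'
      have := ih out ht hout (fun a ha b hb => hle a ha b (List.mem_cons_of_mem _ hb))
      refine ⟨this.1, fun x => ?_⟩
      rw [this.2]
      simp only [List.mem_cons]
      constructor
      · rintro (hx | ⟨hxt, hb⟩)
        · exact Or.inl hx
        · exact Or.inr ⟨Or.inr hxt, hb⟩
      · rintro (hx | ⟨rfl | hxt, hb⟩)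
        · exact Or.inl hx
        · exact Or.inl hv_mem
        · exact Or.inr ⟨hxt, hb⟩
    · -- in range, append v
      have hlt : ∀ a ∈ out, a < v := by
        intro a ha
        rcases lt_or_eq_of_le (hle a ha v (List.mem_cons_self)) with h | rfl
        · exact h
        · -- a ∈ out and a = v: then getLast? = some v (last is the max of out); contradicts hlast
          exfalso
          obtain ⟨m, hm, ham⟩ := le_getLast_of_pairwise_lt out hout a ha
          have hmv : m ≤ a := hle m (List.mem_of_getLast? hm) a List.mem_cons_self
          have : m = a := le_antisymm hmv ham
          rw [hm, this] at hlast
          exact hlast rfl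
      have hout' : (out ++ [v]).Pairwise (· < ·) := by
        rw [List.pairwise_append]
        exact ⟨hout, List.pairwise_singleton _ _, fun a ha b hb => by
          simp only [List.mem_cons, List.not_mem_nil, or_false] at hb
          subst hb; exact hlt a ha⟩
      have hle' : ∀ a ∈ out ++ [v], ∀ b ∈ t, a ≤ b := by
        intro a ha b hb
        rcases List.mem_append.mp ha with hy | hy
        · exact hle a hy b (List.mem_cons_of_mem _ hb)
        · simp only [List.mem_cons, List.not_mem_nil, or_false] at hy
          subst hy; exact hvt b hb
      have := ih (out ++ [v]) ht hout' hle'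
      refine ⟨this.1, fun x => ?_⟩
      rw [this.2]
      simp only [List.mem_append, List.mem_cons, List.not_mem_nil, or_false]
      constructor
      · rintro ((hx | rfl) | ⟨hxt, hb⟩)
        · exact Or.inl hx
        · exact Or.inr ⟨Or.inl rfl, hr⟩
        · exact Or.inr ⟨Or.inr hxt, hb⟩
      · rintro (hx | ⟨rfl | hxt, hb⟩)
        · exact Or.inl (Or.inl hx)
        · exact Or.inl (Or.inr rfl)
        · exact Or.inr ⟨hxt, hb⟩
    · -- out of range, skip
      have := ih out ht hout (fun a ha b hb => hle a ha b (List.mem_cons_of_mem _ hb))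
      refine ⟨this.1, fun x => ?_⟩
      rw [this.2]
      simp only [List.mem_cons]
      constructor
      · rintro (hx | ⟨hxt, hb⟩)
        · exact Or.inl hx
        · exact Or.inr ⟨Or.inr hxt, hb⟩
      · rintro (hx | ⟨rfl | hxt, hb⟩)
        · exact Or.inl hx
        · exact absurd hb hr
        · exact Or.inr ⟨hxt, hb⟩

-- ===== VERDICT (by name: the statement is the Claim_ definition above) =====
theorem normalize_slots_py_spec : Claim_equal_normalize_slots_py := by
  intro slots _
  unfold Spec_normalize_slots_py normalize_slots_py normalize_slots_py_alt
  rw [foldl_append_id]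
  simp only [List.nil_append]
  set L := PySem.List.sorted slots (fun x => x) false with hLdef
  have hL : L.Pairwise (· ≤ ·) := PySem.List.sorted_pairwise slots (fun x => x)
  obtain ⟨hpw, hmem⟩ := scan_invariant L [] hL (List.Pairwise.nil) (by simp)
  apply PySem.List.sorted_eq_of_perm_of_pairwise_lt
  · -- permutation: both nodup with equal membership
    have hndB : (L.foldl (fun out v => if 0 ≤ v ∧ v < 96 then
        if out.getLast? = some v then out else out ++ [v] else out) []).Nodup :=
      hpw.imp ne_of_lt
    have hndA := nodup_foldl_set slots PySem.Set.empty (by simp [PySem.Set.empty])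
    rw [List.perm_ext_iff_of_nodup hndB hndA]
    intro x
    rw [hmem x, mem_foldl_set]
    simp [PySem.Set.empty, PySem.List.mem_sorted, hLdef]
  · exact hpw
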